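-- pv_equiv track=rewrite | github.com/Zemke/algorithms | game_theory/nim.py | can_dead_end
-- ===== SOURCE A (Python) =====
-- S = [2, 3, 5, 7, 11, 13]
--
-- def dead_end(A):
--   """
--   If the buckets A are in state where the game cannot be continued.
--   """
--   for a in A:
--     if a != 1 and a != 0:
--       return False
--   return True
--
-- def can_dead_end(A):
--   for s in S:
--     for A_idx, a in enumerate(A):
--       mod_A = [*A]
--       mod_A[A_idx] = (mod_A[A_idx] - s)
--       if dead_end(mod_A):
--         return True
--   return False
-- ===== SOURCE B (Python) =====
-- S = [2, 3, 5, 7, 11, 13]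
--
-- def can_dead_end(A):
--     bad = [a for a in A if a != 0 and a != 1]
--     return len(bad) == 1 and any(bad[0] - s in (0, 1) for s in S)
-- ===== Notes on version B (the rewrite author's own statement) =====
-- stated objective: faster
-- what changed: Replaces the try-every-(prime,index)-move double loop with full list copies by a single filter pass: the move succeeds iff exactly one bucket is outside {0,1} and that bucket minus some prime in S lands in {0,1}.
import Mathlib
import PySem

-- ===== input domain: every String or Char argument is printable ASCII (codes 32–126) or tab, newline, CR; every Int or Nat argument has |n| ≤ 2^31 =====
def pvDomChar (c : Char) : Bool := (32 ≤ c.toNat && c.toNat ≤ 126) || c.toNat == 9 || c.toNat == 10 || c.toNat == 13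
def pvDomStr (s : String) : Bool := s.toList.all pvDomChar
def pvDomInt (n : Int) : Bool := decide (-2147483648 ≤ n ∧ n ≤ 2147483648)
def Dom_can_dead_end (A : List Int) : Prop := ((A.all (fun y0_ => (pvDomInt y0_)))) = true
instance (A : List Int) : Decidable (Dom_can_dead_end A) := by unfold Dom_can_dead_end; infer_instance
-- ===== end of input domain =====

-- ===== PORT A =====
-- B replaces A's double loop over (prime, index) with one filter pass; return values only.
-- literal transliteration of A: dead_end scans for an element outside {0,1};
-- can_dead_end tries every s in S at every index (mod_A = copy with one bucket reduced).
def dead_end (A : List Int) : Bool :=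
  match A with
  | [] => true
  | a :: rest => if !(a == 1) && !(a == 0) then false else dead_end rest

def cde_inner (A : List Int) (s : Int) (i : Nat) (rest : List Int) : Bool :=
  match rest with
  | [] => false
  | a :: t => if dead_end (A.set i (a - s)) then true else cde_inner A s (i + 1) t

def cde_outer (A : List Int) (ss : List Int) : Bool :=
  match ss with
  | [] => false
  | s :: t => if cde_inner A s 0 A then true else cde_outer A t

def can_dead_end (A : List Int) : Bool := cde_outer A [2, 3, 5, 7, 11, 13]

-- ===== PORT B =====
-- B: one pass collecting the buckets outside {0,1}; a move works iff there is exactly one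
-- and subtracting some prime of S lands it in {0,1}.
def can_dead_end_alt (A : List Int) : Bool :=
  let bad := A.filter (fun a => !(a == 0) && !(a == 1))
  match bad with
  | [b] => [(2 : Int), 3, 5, 7, 11, 13].any (fun s => b - s == 0 || b - s == 1)
  | _ => false

-- ===== PRECONDITION & SPEC =====
def Spec_can_dead_end (A : List Int) (out : Bool) : Prop := out = can_dead_end_alt A
instance (A : List Int) (out : Bool) : Decidable (Spec_can_dead_end A out) := by unfold Spec_can_dead_end; infer_instance

-- ===== CLAIM (what is proved, stated in full; the proofs are below) =====
def Claim_equal_can_dead_end : Prop := ∀ (A : List Int), Dom_can_dead_end A → Spec_can_dead_end A (can_dead_end A)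

-- ===== LEMMAS AND PROOFS =====
def pvGood (a : Int) : Bool := a == 0 || a == 1
def pvBad (a : Int) : Bool := !(a == 0) && !(a == 1)

-- the inner enumerate loop of A, abstracted over the already-scanned prefix
def pvG (s : Int) : List Int → Bool
  | [] => false
  | x :: xs => (pvGood (x - s) && xs.all pvGood) || (pvGood x && pvG s xs)

theorem pvBad_eq (a : Int) : pvBad a = !pvGood a := by
  simp [pvBad, pvGood]

theorem dead_end_eq (A : List Int) : dead_end A = A.all pvGood := by
  induction A with
  | nil => rfl
  | cons a t ih =>
    by_cases h0 : a = 0 <;> by_cases h1 : a = 1 <;>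
      simp [dead_end, pvGood, h0, h1, ih]

theorem good_sub (x s : Int) (hx : pvGood x = true) (hs : 2 ≤ s) :
    pvGood (x - s) = false := by
  simp [pvGood] at *
  omega

theorem set_append_len (P xs : List Int) (x v : Int) :
    (P ++ x :: xs).set P.length v = P ++ v :: xs := by
  induction P with
  | nil => rfl
  | cons p t ih => simp [ih]

theorem all_decide (xs : List Int) :
    decide (∀ x ∈ xs, pvGood x = true) = xs.all pvGood := by
  cases h : xs.all pvGood
  · rw [decide_eq_false]; simpa [List.all_eq_true] using h
  · rw [decide_eq_true]; simpa [List.all_eq_true] using h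

theorem inner_spec (s : Int) (Q : List Int) :
    ∀ P : List Int, cde_inner (P ++ Q) s P.length Q = (P.all pvGood && pvG s Q) := by
  induction Q with
  | nil => intro P; simp [cde_inner, pvG]
  | cons x xs ih =>
    intro P
    have h2 : cde_inner (P ++ x :: xs) s (P.length + 1) xs
        = ((P ++ [x]).all pvGood && pvG s xs) := by
      have := ih (P ++ [x])
      simpa using this
    rw [cde_inner, set_append_len, dead_end_eq, h2]
    cases hP : P.all pvGood <;>
      simp [pvG, hP, Bool.and_or_distrib_left]; rw [all_decide]

theorem all_filter_nil (xs : List Int) :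
    xs.all pvGood = true ↔ xs.filter pvBad = [] := by
  simp [List.all_eq_true, List.filter_eq_nil_iff, pvBad_eq]

theorem pvG_eq (s : Int) (hs : 2 ≤ s) (Q : List Int) :
    pvG s Q = (match Q.filter pvBad with | [b] => pvGood (b - s) | _ => false) := by
  induction Q with
  | nil => rfl
  | cons x xs ih =>
    by_cases hx : pvGood x = true
    · have hb : pvBad x = false := by rw [pvBad_eq, hx]; rfl
      simp [pvG, hx, good_sub x s hx hs, hb, ih]
    · have hxf : pvGood x = false := by simpa using hx
      have hb : pvBad x = true := by rw [pvBad_eq, hxf]; rfl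
      cases hfil : xs.filter pvBad with
      | nil =>
        have hall : xs.all pvGood = true := (all_filter_nil xs).2 hfil
        simp [pvG, hxf, hall, hb, hfil]
      | cons c t =>
        have hall : xs.all pvGood = false := by
          cases h : xs.all pvGood
          · rfl
          · rw [(all_filter_nil xs).1 h] at hfil; cases hfil
        simp [pvG, hxf, hall, hb, hfil]

theorem cde_inner_eq (A : List Int) (s : Int) (hs : 2 ≤ s) :
    cde_inner A s 0 A = (match A.filter pvBad with | [b] => pvGood (b - s) | _ => false) := by
  have h := inner_spec s A []
  simpa [pvG_eq s hs] using h

-- ===== VERDICT (by name: the statement is the Claim_ definition above) =====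
theorem can_dead_end_spec : Claim_equal_can_dead_end := by
  intro A _
  show can_dead_end A = can_dead_end_alt A
  have h2 := cde_inner_eq A 2 (by norm_num)
  have h3 := cde_inner_eq A 3 (by norm_num)
  have h5 := cde_inner_eq A 5 (by norm_num)
  have h7 := cde_inner_eq A 7 (by norm_num)
  have h11 := cde_inner_eq A 11 (by norm_num)
  have h13 := cde_inner_eq A 13 (by norm_num)
  have hpb : (fun a : Int => !decide (a = 0) && !decide (a = 1)) = pvBad := by
    funext a; simp [pvBad, beq_eq_decide]
  have hfB : A.filter (fun a => !decide (a = 0) && !decide (a = 1)) = A.filter pvBad := by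
    rw [hpb]
  rcases hf : A.filter pvBad with _ | ⟨b, _ | ⟨c, t⟩⟩ <;>
    simp [can_dead_end, cde_outer, can_dead_end_alt, hfB, hf, h2, h3, h5, h7, h11, h13,
      pvGood, beq_eq_decide, Bool.or_assoc]
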